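-- pv_equiv track=rewrite | github.com/moghya/DataMiningLab | Binning/binning.py | equal_width_bining
-- ===== SOURCE A (Python) =====
-- import math
--
-- def equal_width_bining(number_of_elements,data,number_of_bins):
-- 	data.sort()
-- 	max_value = max(data)
-- 	min_value = min(data)
-- 	width = math.ceil((max_value-min_value)/number_of_bins)
-- 	bins = []
-- 	j = 0
-- 	for i in range(0,number_of_bins):
-- 		max_value_for_bin = (i+1)*width
-- 		x_bin = []
-- 		while j<number_of_elements and data[j] <= max_value_for_bin:
-- 			x_bin.append(data[j])
-- 			j+=1
-- 		bins.append(x_bin)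
-- 	return bins
-- ===== SOURCE B (Python) =====
-- import math
--
-- def _upper_bound(data, hi, target):
--     # index of the first element > target among data[0:hi] (data sorted ascending)
--     lo = 0
--     while lo < hi:
--         mid = (lo + hi) // 2
--         if data[mid] <= target:
--             lo = mid + 1
--         else:
--             hi = mid
--     return lo
--
-- def equal_width_bining(number_of_elements, data, number_of_bins):
--     data.sort()
--     width = math.ceil((max(data) - min(data)) / number_of_bins)
--     m = min(number_of_elements, len(data))
--     if m < 0:
--         m = 0
--     bins = []
--     prev = 0
--     for i in range(number_of_bins):
--         cut = _upper_bound(data, m, (i + 1) * width)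
--         bins.append(data[prev:cut])
--         prev = cut
--     return bins
-- ===== Notes on version B (the rewrite author's own statement) =====
-- stated objective: alternative
-- what changed: Replaces A's shared-pointer nested for/while sweep by computing each bin boundary's cut index with a hand-written binary search over the sorted data and emitting each bin as the slice between consecutive cuts.
import Mathlib
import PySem

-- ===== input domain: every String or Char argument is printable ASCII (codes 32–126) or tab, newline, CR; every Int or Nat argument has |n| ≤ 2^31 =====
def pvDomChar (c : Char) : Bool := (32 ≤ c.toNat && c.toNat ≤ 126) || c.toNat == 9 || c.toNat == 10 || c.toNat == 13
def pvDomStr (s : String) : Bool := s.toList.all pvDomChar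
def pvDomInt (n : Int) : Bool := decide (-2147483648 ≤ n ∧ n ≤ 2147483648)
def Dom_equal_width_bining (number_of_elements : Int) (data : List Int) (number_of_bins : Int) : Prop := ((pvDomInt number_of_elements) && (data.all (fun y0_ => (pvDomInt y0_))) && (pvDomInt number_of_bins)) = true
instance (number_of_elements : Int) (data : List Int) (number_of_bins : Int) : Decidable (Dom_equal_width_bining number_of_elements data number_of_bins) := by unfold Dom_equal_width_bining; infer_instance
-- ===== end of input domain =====

-- B replaces A's shared-pointer for/while sweep by binary-searched cut indices and slices
-- between consecutive cuts (objective: alternative decomposition, not speed; both sort `data`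
-- in place in Python — the equivalence proved here is about the RETURN value).


-- ===== PORT A =====
-- A's inner while loop: consume data[j] while j < n and data[j] <= bound.
-- pyGet? = none is Python's IndexError (those inputs are excluded by Pre_); fuel bounds the
-- loop and is always sufficient under 0 ≤ j ≤ len.
def pvTakeA (d : List Int) (n bound : Int) (j : Int) : Nat → List Int × Int
  | 0 => ([], j)
  | fuel+1 =>
    if j < n then
      match PySem.List.pyGet? d j with
      | some x =>
        if x ≤ bound then
          let r := pvTakeA d n bound (j+1) fuel
          (x :: r.1, r.2)
        else ([], j)
      | none => ([], j)
    else ([], j)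

def equal_width_bining (number_of_elements : Int) (data : List Int) (number_of_bins : Int) : List (List Int) :=
  let d := PySem.List.sorted data (fun x => x) false
  let max_value := (PySem.List.max? d (fun x => x)).getD 0
  let min_value := (PySem.List.min? d (fun x => x)).getD 0
  -- math.ceil((max-min)/bins) = -((-(max-min)) // bins): exact on this Int domain (|n| ≤ 2^31 < 2^53)
  let width := -(PySem.Int.floordiv (-(max_value - min_value)) number_of_bins)
  ((PySem.List.pyRange 0 number_of_bins 1).foldl
    (fun (st : List (List Int) × Int) i =>
      let r := pvTakeA d number_of_elements ((i + 1) * width) st.2 (d.length + 1)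
      (st.1 ++ [r.1], r.2)) ([], 0)).1

-- ===== PORT B =====
-- Source B's _upper_bound: binary search for the first index in [lo,hi) whose element exceeds target.
-- fuel bounds the while loop and is always sufficient: the gap shrinks every iteration.
def pvUB (d : List Int) (target : Int) (lo hi : Int) : Nat → Int
  | 0 => lo
  | fuel+1 =>
    if lo < hi then
      let mid := PySem.Int.floordiv (lo + hi) 2
      if PySem.List.pyGetD d mid 0 ≤ target then pvUB d target (mid + 1) hi fuel
      else pvUB d target lo mid fuel
    else lo

def equal_width_bining_alt (number_of_elements : Int) (data : List Int) (number_of_bins : Int) : List (List Int) :=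
  let d := PySem.List.sorted data (fun x => x) false
  -- math.ceil((max-min)/bins), exact as in port A
  let width := -(PySem.Int.floordiv (-((PySem.List.max? d (fun x => x)).getD 0 - (PySem.List.min? d (fun x => x)).getD 0)) number_of_bins)
  let m0 := min number_of_elements (d.length : Int)
  let m := if m0 < 0 then 0 else m0
  ((PySem.List.pyRange 0 number_of_bins 1).foldl
    (fun (st : List (List Int) × Int) i =>
      let cut := pvUB d ((i + 1) * width) 0 m d.length
      (st.1 ++ [PySem.List.slice d (some st.2) (some cut)], cut)) ([], 0)).1

-- ===== PRECONDITION & SPEC =====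
-- Pre_ excludes exactly the inputs on which A raises: empty data (ValueError from max),
-- number_of_bins = 0 (ZeroDivisionError), and the IndexError region where the pointer runs
-- past the end of data (number_of_elements > len(data), positive bins, and every element ≤ bins*width).
def Pre_equal_width_bining (number_of_elements : Int) (data : List Int) (number_of_bins : Int) : Prop :=
  data ≠ [] ∧ number_of_bins ≠ 0 ∧
  (number_of_elements ≤ (data.length : Int) ∨ number_of_bins < 0 ∨
    number_of_bins * (-(PySem.Int.floordiv (-((PySem.List.max? data (fun x => x)).getD 0 - (PySem.List.min? data (fun x => x)).getD 0)) number_of_bins)) < (PySem.List.max? data (fun x => x)).getD 0)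
instance (number_of_elements : Int) (data : List Int) (number_of_bins : Int) : Decidable (Pre_equal_width_bining number_of_elements data number_of_bins) := by unfold Pre_equal_width_bining; infer_instance

def pvWitness_equal_width_bining : Int × List Int × Int := (3, [1, 5, 7], 2)

def Spec_equal_width_bining (number_of_elements : Int) (data : List Int) (number_of_bins : Int) (out : List (List Int)) : Prop := out = equal_width_bining_alt number_of_elements data number_of_bins
instance (number_of_elements : Int) (data : List Int) (number_of_bins : Int) (out : List (List Int)) : Decidable (Spec_equal_width_bining number_of_elements data number_of_bins out) := by unfold Spec_equal_width_bining; infer_instance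

-- ===== CLAIM (what is proved, stated in full; the proofs are below) =====
def Claim_equal_equal_width_bining : Prop := ∀ (number_of_elements : Int) (data : List Int) (number_of_bins : Int), Dom_equal_width_bining number_of_elements data number_of_bins → Pre_equal_width_bining number_of_elements data number_of_bins → Spec_equal_width_bining number_of_elements data number_of_bins (equal_width_bining number_of_elements data number_of_bins)

-- ===== LEMMAS AND PROOFS =====
-- number of elements of d that are ≤ b (as an Int)
def pvCnt (d : List Int) (b : Int) : Int := (d.countP (fun x => decide (x ≤ b)) : Int)

lemma pvCnt_nonneg (d : List Int) (b : Int) : 0 ≤ pvCnt d b := by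
  simp [pvCnt]

lemma pvCnt_le_length (d : List Int) (b : Int) : pvCnt d b ≤ (d.length : Int) := by
  simp [pvCnt]; exact_mod_cast List.countP_le_length

lemma pvCnt_mono (d : List Int) {b b' : Int} (h : b ≤ b') : pvCnt d b ≤ pvCnt d b' := by
  simp only [pvCnt, Int.ofNat_le]
  exact List.countP_mono_left (fun a _ ha => by simp at ha ⊢; omega)

lemma pvCnt_ge (d : List Int) (b : Int) (hp : List.Pairwise (· ≤ ·) d) (j : Nat)
    (hj : j < d.length) (hle : d[j] ≤ b) : (j : Int) + 1 ≤ pvCnt d b := by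
  have hmono := List.pairwise_iff_getElem.mp hp
  have h1 : (d.take (j+1)).countP (fun x => decide (x ≤ b)) = j + 1 := by
    rw [List.countP_eq_length.mpr, List.length_take]
    · omega
    · intro x hx
      rw [List.mem_iff_getElem] at hx
      obtain ⟨i, hi, rfl⟩ := hx
      have hi' : i < j + 1 := by simp [List.length_take] at hi; omega
      rw [List.getElem_take]
      simp only [decide_eq_true_eq]
      rcases Nat.lt_or_ge i j with h | h
      · exact le_trans (hmono i j (by omega) hj h) hle
      · have : i = j := by omega
        subst this; exact hle
  have h2 : d.countP (fun x => decide (x ≤ b)) = (d.take (j+1)).countP (fun x => decide (x ≤ b)) + (d.drop (j+1)).countP (fun x => decide (x ≤ b)) := by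
    conv_lhs => rw [← List.take_append_drop (j+1) d]
    rw [List.countP_append]
  simp only [pvCnt]; omega

lemma pvCnt_le (d : List Int) (b : Int) (hp : List.Pairwise (· ≤ ·) d) (j : Nat)
    (hj : j < d.length) (hgt : b < d[j]) : pvCnt d b ≤ (j : Int) := by
  have hmono := List.pairwise_iff_getElem.mp hp
  have h0 : (d.drop j).countP (fun x => decide (x ≤ b)) = 0 := by
    rw [List.countP_eq_zero]
    intro x hx
    rw [List.mem_iff_getElem] at hx
    obtain ⟨i, hi, rfl⟩ := hx
    have hi' : j + i < d.length := by simp [List.length_drop] at hi; omega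
    rw [List.getElem_drop]
    simp only [decide_eq_true_eq]
    rcases Nat.eq_zero_or_pos i with h | h
    · subst h; simp only [Nat.add_zero]; omega
    · have := hmono j (j+i) hj hi' (by omega); omega
  have h1 : (d.take j).countP (fun x => decide (x ≤ b)) ≤ j := by
    calc (d.take j).countP _ ≤ (d.take j).length := List.countP_le_length
    _ ≤ j := by simp [List.length_take]
  have h2 : d.countP (fun x => decide (x ≤ b)) = (d.take j).countP (fun x => decide (x ≤ b)) + (d.drop j).countP (fun x => decide (x ≤ b)) := by
    conv_lhs => rw [← List.take_append_drop j d]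
    rw [List.countP_append]
  simp only [pvCnt]; omega

lemma pvSlice_self (d : List Int) (j : Int) (h : 0 ≤ j) :
    PySem.List.slice d (some j) (some j) = [] := by
  rw [PySem.List.slice_toNat d h h]; simp

lemma pvSlice_cons (d : List Int) (j t : Int) (h0 : 0 ≤ j) (hjt : j < t)
    (ht : t ≤ (d.length : Int)) (hlt : j.toNat < d.length) :
    PySem.List.slice d (some j) (some t) = d[j.toNat] :: PySem.List.slice d (some (j + 1)) (some t) := by
  rw [PySem.List.slice_toNat d h0 (by omega), PySem.List.slice_toNat d (by omega) (by omega)]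
  rw [List.drop_eq_getElem_cons hlt]
  have h2 : (j+1).toNat = j.toNat + 1 := by omega
  have h1 : t.toNat - j.toNat = (t.toNat - (j+1).toNat) + 1 := by omega
  rw [h1, List.take_succ_cons, h2]

lemma pvTakeA_eq (d : List Int) (n b : Int) (hp : List.Pairwise (· ≤ ·) d) :
    ∀ (fuel : Nat) (j : Int), 0 ≤ j → j ≤ (d.length : Int) → d.length - j.toNat < fuel →
    pvTakeA d n b j fuel =
      (PySem.List.slice d (some j) (some (max j (min (max 0 (min n (d.length : Int))) (pvCnt d b)))),
       max j (min (max 0 (min n (d.length : Int))) (pvCnt d b))) := by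
  intro fuel
  induction fuel with
  | zero => intro j h0 hl hf; omega
  | succ fuel ih =>
    intro j h0 hl hf
    have hC0 := pvCnt_nonneg d b
    have hCl := pvCnt_le_length d b
    by_cases hjn : j < n
    · rcases lt_or_eq_of_le hl with hjl | hjl
      · -- j < len
        have hjl' : j.toNat < d.length := by omega
        rw [pvTakeA, if_pos hjn, PySem.List.pyGet?_eq_some_getElem d h0 hjl]
        dsimp only
        by_cases hxb : d[j.toNat] ≤ b
        · rw [if_pos hxb]
          have hge : (j.toNat : Int) + 1 ≤ pvCnt d b := pvCnt_ge d b hp j.toNat hjl' hxb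
          have hkey : max j (min (max 0 (min n (d.length : Int))) (pvCnt d b))
              = max (j+1) (min (max 0 (min n (d.length : Int))) (pvCnt d b)) := by omega
          rw [ih (j+1) (by omega) (by omega) (by omega)]
          simp only [hkey]
          rw [pvSlice_cons d j (max (j + 1) (min (max 0 (min n (d.length : Int))) (pvCnt d b))) h0 (by omega) (by omega) hjl']
        · rw [if_neg hxb]
          have hle' : pvCnt d b ≤ (j.toNat : Int) := pvCnt_le d b hp j.toNat hjl' (by omega)
          have hkey : max j (min (max 0 (min n (d.length : Int))) (pvCnt d b)) = j := by omega
          rw [hkey, pvSlice_self d j h0]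
      · -- j = len : IndexError in Python (outside Pre_); the port stops
        rw [pvTakeA, if_pos hjn]
        have : PySem.List.pyGet? d j = none := by
          rw [PySem.List.pyGet?_eq_none_iff]
          simp [PySem.Raise.InRange]; omega
        rw [this]
        dsimp only
        have hkey : max j (min (max 0 (min n (d.length : Int))) (pvCnt d b)) = j := by omega
        rw [hkey, pvSlice_self d j h0]
    · rw [pvTakeA, if_neg hjn]
      have hkey : max j (min (max 0 (min n (d.length : Int))) (pvCnt d b)) = j := by omega
      rw [hkey, pvSlice_self d j h0]

lemma pvUB_eq (d : List Int) (b m : Int) (hp : List.Pairwise (· ≤ ·) d)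
    (hm0 : 0 ≤ m) (hml : m ≤ (d.length : Int)) :
    ∀ (fuel : Nat) (lo hi : Int), 0 ≤ lo → lo ≤ hi → hi ≤ m → (hi - lo).toNat ≤ fuel →
    lo ≤ pvCnt d b → (pvCnt d b ≤ hi ∨ hi = m) →
    pvUB d b lo hi fuel = min m (pvCnt d b) := by
  intro fuel
  induction fuel with
  | zero =>
    intro lo hi h0 hlh hhm hf hlc hrc
    have : lo = hi := by omega
    subst this
    rw [pvUB]
    rcases hrc with h | h
    · omega
    · omega
  | succ fuel ih =>
    intro lo hi h0 hlh hhm hf hlc hrc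
    rw [pvUB]
    by_cases hlt : lo < hi
    · rw [if_pos hlt]
      have hmid := PySem.Int.floordiv_two_mid_bounds (le_of_lt hlt)
      have hmidlt : PySem.Int.floordiv (lo + hi) 2 < hi := by
        rw [PySem.Int.floordiv_lt_iff_lt_mul (by omega)]; omega
      set mid := PySem.Int.floordiv (lo + hi) 2 with hmiddef
      have hmid0 : 0 ≤ mid := by omega
      have hmidlen : mid < (d.length : Int) := by omega
      have hget : PySem.List.pyGetD d mid 0 = d[mid.toNat] :=
        PySem.List.pyGetD_eq_getElem d 0 hmid0 hmidlen
      dsimp only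
      rw [hget]
      by_cases hxb : d[mid.toNat] ≤ b
      · rw [if_pos hxb]
        have hge : (mid.toNat : Int) + 1 ≤ pvCnt d b := pvCnt_ge d b hp mid.toNat (by omega) hxb
        exact ih (mid+1) hi (by omega) (by omega) hhm (by omega) (by omega) hrc
      · rw [if_neg hxb]
        have hle : pvCnt d b ≤ (mid.toNat : Int) := pvCnt_le d b hp mid.toNat (by omega) (by omega)
        exact ih lo mid h0 (by omega) (by omega) (by omega) hlc (by left; omega)
    · rw [if_neg hlt]
      have : lo = hi := by omega
      rcases hrc with h | h <;> omega

lemma pvFold_eq (d : List Int) (n width : Int) (hp : List.Pairwise (· ≤ ·) d) (hw : 0 ≤ width) :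
    ∀ (k : Nat) (a : Int) (acc : List (List Int)) (j : Int),
      0 ≤ j → j ≤ max 0 (min n (d.length : Int)) → j ≤ pvCnt d ((a + 1) * width) →
      ((PySem.List.pyRange a (a + k) 1).foldl
        (fun (st : List (List Int) × Int) i =>
          let r := pvTakeA d n ((i + 1) * width) st.2 (d.length + 1)
          (st.1 ++ [r.1], r.2)) (acc, j)).1 =
      ((PySem.List.pyRange a (a + k) 1).foldl
        (fun (st : List (List Int) × Int) i =>
          let cut := pvUB d ((i + 1) * width) 0 (max 0 (min n (d.length : Int))) d.length
          (st.1 ++ [PySem.List.slice d (some st.2) (some cut)], cut)) (acc, j)).1 := by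
  intro k
  induction k with
  | zero =>
    intro a acc j h0 hjm hjc
    simp [PySem.List.pyRange_one_eq_nil (le_refl a)]
  | succ k ih =>
    intro a acc j h0 hjm hjc
    have hM0 : (0:Int) ≤ max 0 (min n (d.length : Int)) := by omega
    have hMl : max 0 (min n (d.length : Int)) ≤ (d.length : Int) := by
      have : (0:Int) ≤ (d.length : Int) := by positivity
      omega
    have hC0 := pvCnt_nonneg d ((a + 1) * width)
    have hr : PySem.List.pyRange a (a + ((k:Nat)+1:Nat)) 1
        = a :: PySem.List.pyRange (a+1) ((a+1) + (k:Nat)) 1 := by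
      rw [PySem.List.pyRange_one_cons (by push_cast; omega)]
      have : a + ((k:Nat)+1:Nat) = (a+1) + (k:Nat) := by push_cast; omega
      rw [this]
    rw [hr]
    simp only [List.foldl_cons]
    have hstepA : pvTakeA d n ((a + 1) * width) j (d.length + 1)
        = (PySem.List.slice d (some j) (some (max j (min (max 0 (min n (d.length : Int))) (pvCnt d ((a+1)*width))))),
           max j (min (max 0 (min n (d.length : Int))) (pvCnt d ((a+1)*width)))) :=
      pvTakeA_eq d n ((a+1)*width) hp (d.length + 1) j h0 (by omega) (by omega)
    have hmaxj : max j (min (max 0 (min n (d.length : Int))) (pvCnt d ((a+1)*width)))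
        = min (max 0 (min n (d.length : Int))) (pvCnt d ((a+1)*width)) := by omega
    have hstepB : pvUB d ((a + 1) * width) 0 (max 0 (min n (d.length : Int))) d.length
        = min (max 0 (min n (d.length : Int))) (pvCnt d ((a+1)*width)) :=
      pvUB_eq d ((a+1)*width) (max 0 (min n (d.length : Int))) hp hM0 hMl d.length 0
        (max 0 (min n (d.length : Int))) le_rfl hM0 le_rfl (by omega) hC0 (Or.inr rfl)
    rw [hstepA, hmaxj, hstepB]
    have hmono : pvCnt d ((a+1)*width) ≤ pvCnt d ((a+1+1)*width) := by
      apply pvCnt_mono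
      nlinarith
    exact ih (a+1) (acc ++ [PySem.List.slice d (some j) (some (min (max 0 (min n (d.length : Int))) (pvCnt d ((a+1)*width))))])
      (min (max 0 (min n (d.length : Int))) (pvCnt d ((a+1)*width))) (by omega) (by omega) (by omega)

lemma pvMaxD_sorted (data : List Int) (hne : data ≠ []) :
    ((PySem.List.max? (PySem.List.sorted data (fun x => x) false) (fun x => x)).getD 0) =
    ((PySem.List.max? data (fun x => x)).getD 0) := by
  have hsne : PySem.List.sorted data (fun x => x) false ≠ [] := by
    rw [Ne, PySem.List.sorted_eq_nil_iff]; exact hne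
  rcases hm1 : PySem.List.max? (PySem.List.sorted data (fun x => x) false) (fun x => x) with _ | m1
  · exact absurd ((PySem.List.max?_eq_none_iff _ _).mp hm1) hsne
  rcases hm2 : PySem.List.max? data (fun x => x) with _ | m2
  · exact absurd ((PySem.List.max?_eq_none_iff _ _).mp hm2) hne
  simp only [Option.getD_some]
  have h1 := PySem.List.max?_isMax hm1 m2 ((PySem.List.mem_sorted data (fun x => x) false m2).mpr (PySem.List.max?_mem hm2))
  have h2 := PySem.List.max?_isMax hm2 m1 ((PySem.List.mem_sorted data (fun x => x) false m1).mp (PySem.List.max?_mem hm1))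
  omega

lemma pvMinD_sorted (data : List Int) (hne : data ≠ []) :
    ((PySem.List.min? (PySem.List.sorted data (fun x => x) false) (fun x => x)).getD 0) =
    ((PySem.List.min? data (fun x => x)).getD 0) := by
  have hsne : PySem.List.sorted data (fun x => x) false ≠ [] := by
    rw [Ne, PySem.List.sorted_eq_nil_iff]; exact hne
  rcases hm1 : PySem.List.min? (PySem.List.sorted data (fun x => x) false) (fun x => x) with _ | m1
  · exact absurd ((PySem.List.min?_eq_none_iff _ _).mp hm1) hsne
  rcases hm2 : PySem.List.min? data (fun x => x) with _ | m2
  · exact absurd ((PySem.List.min?_eq_none_iff _ _).mp hm2) hne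
  simp only [Option.getD_some]
  have h1 := PySem.List.min?_isMin hm1 m2 ((PySem.List.mem_sorted data (fun x => x) false m2).mpr (PySem.List.min?_mem hm2))
  have h2 := PySem.List.min?_isMin hm2 m1 ((PySem.List.mem_sorted data (fun x => x) false m1).mp (PySem.List.min?_mem hm1))
  omega

lemma pvMinD_le_pvMaxD (data : List Int) (hne : data ≠ []) :
    ((PySem.List.min? data (fun x => x)).getD 0) ≤ ((PySem.List.max? data (fun x => x)).getD 0) := by
  rcases hm1 : PySem.List.max? data (fun x => x) with _ | m1
  · exact absurd ((PySem.List.max?_eq_none_iff _ _).mp hm1) hne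
  rcases hm2 : PySem.List.min? data (fun x => x) with _ | m2
  · exact absurd ((PySem.List.min?_eq_none_iff _ _).mp hm2) hne
  simp only [Option.getD_some]
  exact PySem.List.min?_isMin hm2 m1 (PySem.List.max?_mem hm1)

lemma pvMain (number_of_elements : Int) (data : List Int) (number_of_bins : Int)
    (hne : data ≠ []) (hb : number_of_bins ≠ 0) :
    equal_width_bining number_of_elements data number_of_bins
      = equal_width_bining_alt number_of_elements data number_of_bins := by
  simp only [equal_width_bining, equal_width_bining_alt]
  set d := PySem.List.sorted data (fun x => x) false with hd
  rcases lt_or_gt_of_ne hb with hneg | hpos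
  · rw [PySem.List.pyRange_one_eq_nil (by omega)]
    rfl
  · have hsne : d ≠ [] := by rw [hd, Ne, PySem.List.sorted_eq_nil_iff]; exact hne
    have hΔ : 0 ≤ (PySem.List.max? d (fun x => x)).getD 0 - (PySem.List.min? d (fun x => x)).getD 0 := by
      have h1 := pvMinD_le_pvMaxD data hne
      rw [hd, pvMaxD_sorted data hne, pvMinD_sorted data hne]; omega
    set width := -(PySem.Int.floordiv (-((PySem.List.max? d (fun x => x)).getD 0 - (PySem.List.min? d (fun x => x)).getD 0)) number_of_bins) with hwdef
    have hw : 0 ≤ width := by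
      have : PySem.Int.floordiv (-((PySem.List.max? d (fun x => x)).getD 0 - (PySem.List.min? d (fun x => x)).getD 0)) number_of_bins < 1 := by
        rw [PySem.Int.floordiv_lt_iff_lt_mul hpos]; omega
      omega
    have hm : (if min number_of_elements ((d.length : Nat) : Int) < 0 then (0:Int) else min number_of_elements ((d.length : Nat) : Int))
        = max 0 (min number_of_elements ((d.length : Nat) : Int)) := by
      split <;> omega
    rw [hm]
    have hrange : (0 : Int) + ((number_of_bins.toNat : Nat) : Int) = number_of_bins := by omega
    have := pvFold_eq d number_of_elements width
      (PySem.List.sorted_pairwise data (fun x => x)) hw number_of_bins.toNat 0 [] 0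
      le_rfl (by omega) (pvCnt_nonneg d ((0 + 1) * width))
    rw [hrange] at this
    exact this

-- ===== VERDICT (by name: the statement is the Claim_ definition above) =====
theorem equal_width_bining_spec : Claim_equal_equal_width_bining := by
  intro number_of_elements data number_of_bins _hdom hpre
  unfold Spec_equal_width_bining
  exact pvMain number_of_elements data number_of_bins hpre.1 hpre.2.1
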